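-- pv_equiv track=rewrite | github.com/WolfElkan/baseball | roster_utils/asciify.py | from_ord
-- ===== SOURCE A (Python) =====
-- singles = {
-- 	0xC6:'AE',
-- 	0xE6:'ae',
-- 	0xC7:'C',
-- 	0xE7:'c',
-- 	0xD0:'D',
-- 	0xF0:'6',
-- 	0xD1:'N',
-- 	0xF1:'n',
-- 	0xD7:'*',
-- 	0xF7:'/',
-- 	0xDD:'Y',
-- 	0xFD:'y',
-- 	0xFF:'y',
-- 	 306:'IJ',
-- 	 307:'ij',
-- 	 308:'J',
-- 	 309:'j',
-- 	 310:'K',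
-- 	 311:'k',
-- 	 312:'K',
-- 	 329:"'n",
-- 	 330:"Ng",
-- 	 331:"ng",
-- 	 338:"OE",
-- 	 339:"oe",
-- }
--
-- ranges = [
-- 	(0xC0,0xC5,'A'),
-- 	(0xC8,0xCB,'E'),
-- 	(0xCC,0xCF,'I'),
-- 	(0xD2,0xD8,'O'),
-- 	(0xD9,0xDC,'U'),
-- 	(0xE0,0xE5,'a'),
-- 	(0xE8,0xEB,'e'),
-- 	(0xEC,0xEF,'i'),
-- 	(0xF2,0xF8,'o'),
-- 	(0xF9,0xFC,'u'),
-- ]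
--
-- doubles = [
-- 	(0x100,0x105,'A','a'),
-- 	(0x106,0x10D,'C','c'),
-- 	(0x10E,0x111,'D','d'),
-- 	(0x112,0x11B,'E','e'),
-- 	(0x11C,0x123,'G','g'),
-- 	(0x124,0x127,'H','h'),
-- 	(0x128,0x131,'I','i'),
-- 	(0x139,0x142,'l','L'),
-- 	(0x143,0x148,'n','N'),
-- 	(0x14C,0x151,'O','o'),
-- ]
--
-- def from_ord(num, safe=False):
-- 	if 32 < num < 127:
-- 		return chr(num)
-- 	if num in singles:
-- 		return singles[num]
-- 	for start, end, char in ranges: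
-- 		if start <= num <= end:
-- 			return char
-- 	for start, end, even, odd in doubles:
-- 		if start <= num <= end:
-- 			return odd if num % 2 else even
-- 	if not safe:
-- 		num = hex(num)[2:].upper()
-- 		while len(num) < 4:
-- 			num = '0' + num
-- 		raise Warning('No ASCII equivalent defined for U+'+num)
-- ===== SOURCE B (Python) =====
-- # B: a single flat precomputed table mapping each covered code point directly to
-- # its ASCII string (the range/doubles/singles data of A expanded offline, singles
-- # taking priority); from_ord is one dict lookup instead of two first-match scans.
--
-- TABLE = {
--     192: 'A',
--     193: 'A',
--     194: 'A',
--     195: 'A',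
--     196: 'A',
--     197: 'A',
--     198: 'AE',
--     199: 'C',
--     200: 'E',
--     201: 'E',
--     202: 'E',
--     203: 'E',
--     204: 'I',
--     205: 'I',
--     206: 'I',
--     207: 'I',
--     208: 'D',
--     209: 'N',
--     210: 'O',
--     211: 'O',
--     212: 'O',
--     213: 'O',
--     214: 'O',
--     215: '*',
--     216: 'O',
--     217: 'U',
--     218: 'U',
--     219: 'U',
--     220: 'U',
--     221: 'Y',
--     224: 'a',
--     225: 'a',
--     226: 'a',
--     227: 'a',
--     228: 'a',
--     229: 'a',
--     230: 'ae',
--     231: 'c',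
--     232: 'e',
--     233: 'e',
--     234: 'e',
--     235: 'e',
--     236: 'i',
--     237: 'i',
--     238: 'i',
--     239: 'i',
--     240: '6',
--     241: 'n',
--     242: 'o',
--     243: 'o',
--     244: 'o',
--     245: 'o',
--     246: 'o',
--     247: '/',
--     248: 'o',
--     249: 'u',
--     250: 'u',
--     251: 'u',
--     252: 'u',
--     253: 'y',
--     255: 'y',
--     256: 'A',
--     257: 'a',
--     258: 'A',
--     259: 'a',
--     260: 'A',
--     261: 'a',
--     262: 'C',
--     263: 'c',
--     264: 'C',
--     265: 'c',
--     266: 'C',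
--     267: 'c',
--     268: 'C',
--     269: 'c',
--     270: 'D',
--     271: 'd',
--     272: 'D',
--     273: 'd',
--     274: 'E',
--     275: 'e',
--     276: 'E',
--     277: 'e',
--     278: 'E',
--     279: 'e',
--     280: 'E',
--     281: 'e',
--     282: 'E',
--     283: 'e',
--     284: 'G',
--     285: 'g',
--     286: 'G',
--     287: 'g',
--     288: 'G',
--     289: 'g',
--     290: 'G',
--     291: 'g',
--     292: 'H',
--     293: 'h',
--     294: 'H',
--     295: 'h',
--     296: 'I',
--     297: 'i',
--     298: 'I',
--     299: 'i',
--     300: 'I',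
--     301: 'i',
--     302: 'I',
--     303: 'i',
--     304: 'I',
--     305: 'i',
--     306: 'IJ',
--     307: 'ij',
--     308: 'J',
--     309: 'j',
--     310: 'K',
--     311: 'k',
--     312: 'K',
--     313: 'L',
--     314: 'l',
--     315: 'L',
--     316: 'l',
--     317: 'L',
--     318: 'l',
--     319: 'L',
--     320: 'l',
--     321: 'L',
--     322: 'l',
--     323: 'N',
--     324: 'n',
--     325: 'N',
--     326: 'n',
--     327: 'N',
--     328: 'n',
--     329: "'n",
--     330: 'Ng',
--     331: 'ng',
--     332: 'O',
--     333: 'o',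
--     334: 'O',
--     335: 'o',
--     336: 'O',
--     337: 'o',
--     338: 'OE',
--     339: 'oe',
-- }
--
--
-- def from_ord(num, safe=False):
--     if 32 < num < 127:
--         return chr(num)
--     hit = TABLE.get(num)
--     if hit is not None:
--         return hit
--     if not safe:
--         raise Warning('No ASCII equivalent defined for U+%04X' % num)
-- ===== Notes on version B (the rewrite author's own statement) =====
-- stated objective: idiomatic
-- what changed: A's two sequential first-match scans over the ranges and doubles lists (plus a singles dict check) are replaced by one flat precomputed code-point -> string table (ranges and doubles expanded with the parity rule offline, singles overlaid so they keep priority), so from_ord is a single dict lookup.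
import Mathlib
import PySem

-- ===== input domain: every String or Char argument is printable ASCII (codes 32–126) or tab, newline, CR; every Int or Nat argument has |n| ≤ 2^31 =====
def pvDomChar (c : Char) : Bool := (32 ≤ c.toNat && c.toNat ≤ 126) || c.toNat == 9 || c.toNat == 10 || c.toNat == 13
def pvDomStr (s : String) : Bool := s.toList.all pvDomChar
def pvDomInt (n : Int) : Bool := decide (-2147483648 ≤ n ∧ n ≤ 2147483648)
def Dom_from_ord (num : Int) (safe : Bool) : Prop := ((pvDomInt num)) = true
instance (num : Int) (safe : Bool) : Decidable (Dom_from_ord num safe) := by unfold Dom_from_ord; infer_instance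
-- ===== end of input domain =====

-- B replaces A's two sequential first-match scans with one flat precomputed code-point →
-- string table and a single lookup (objective: idiomatic). Where Python A raises Warning
-- both ports return none; those inputs are excluded by Pre_from_ord.

-- ===== PORT A =====
def pvSingles : PySem.Dict Int String := PySem.Dict.ofList
  [(0xC6, "AE"), (0xE6, "ae"), (0xC7, "C"), (0xE7, "c"), (0xD0, "D"), (0xF0, "6"),
   (0xD1, "N"), (0xF1, "n"), (0xD7, "*"), (0xF7, "/"), (0xDD, "Y"), (0xFD, "y"),
   (0xFF, "y"), (306, "IJ"), (307, "ij"), (308, "J"), (309, "j"), (310, "K"),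
   (311, "k"), (312, "K"), (329, "'n"), (330, "Ng"), (331, "ng"), (338, "OE"), (339, "oe")]

def pvRanges : List (Int × Int × String) :=
  [(0xC0, 0xC5, "A"), (0xC8, 0xCB, "E"), (0xCC, 0xCF, "I"), (0xD2, 0xD8, "O"),
   (0xD9, 0xDC, "U"), (0xE0, 0xE5, "a"), (0xE8, 0xEB, "e"), (0xEC, 0xEF, "i"),
   (0xF2, 0xF8, "o"), (0xF9, 0xFC, "u")]

def pvDoubles : List (Int × Int × String × String) :=
  [(0x100, 0x105, "A", "a"), (0x106, 0x10D, "C", "c"), (0x10E, 0x111, "D", "d"),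
   (0x112, 0x11B, "E", "e"), (0x11C, 0x123, "G", "g"), (0x124, 0x127, "H", "h"),
   (0x128, 0x131, "I", "i"), (0x139, 0x142, "l", "L"), (0x143, 0x148, "n", "N"),
   (0x14C, 0x151, "O", "o")]

-- chr(num): exact for 32 < num < 127 (the only place either Python calls it)
def pvChr (num : Int) : String := String.ofList [Char.ofNat num.toNat]

-- the two for-loops with early return, as first-match scans over the same lists
def from_ord (num : Int) (safe : Bool) : Option String :=
  if 32 < num ∧ num < 127 then some (pvChr num)
  else if (pvSingles.get? num).isSome then pvSingles.get? num
  else match pvRanges.findSome? (fun t => if t.1 ≤ num ∧ num ≤ t.2.1 then some t.2.2 else none) with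
  | some c => some c
  | none =>
    match pvDoubles.findSome? (fun t =>
        if t.1 ≤ num ∧ num ≤ t.2.1 then
          some (if PySem.Int.mod num 2 ≠ 0 then t.2.2.2 else t.2.2.1)
        else none) with
    | some c => some c
    | none => none  -- safe: Python returns None; unsafe: Python raises Warning (outside Pre_)

-- ===== PORT B =====
-- Source B's TABLE: the flat precomputed code-point → ASCII string dict, a literal
def pvTable : PySem.Dict Int String := PySem.Dict.ofList
  [(192, "A"), (193, "A"), (194, "A"), (195, "A"), (196, "A"), (197, "A"),
   (198, "AE"), (199, "C"), (200, "E"), (201, "E"), (202, "E"), (203, "E"),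
   (204, "I"), (205, "I"), (206, "I"), (207, "I"), (208, "D"), (209, "N"),
   (210, "O"), (211, "O"), (212, "O"), (213, "O"), (214, "O"), (215, "*"),
   (216, "O"), (217, "U"), (218, "U"), (219, "U"), (220, "U"), (221, "Y"),
   (224, "a"), (225, "a"), (226, "a"), (227, "a"), (228, "a"), (229, "a"),
   (230, "ae"), (231, "c"), (232, "e"), (233, "e"), (234, "e"), (235, "e"),
   (236, "i"), (237, "i"), (238, "i"), (239, "i"), (240, "6"), (241, "n"),
   (242, "o"), (243, "o"), (244, "o"), (245, "o"), (246, "o"), (247, "/"),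
   (248, "o"), (249, "u"), (250, "u"), (251, "u"), (252, "u"), (253, "y"),
   (255, "y"), (256, "A"), (257, "a"), (258, "A"), (259, "a"), (260, "A"),
   (261, "a"), (262, "C"), (263, "c"), (264, "C"), (265, "c"), (266, "C"),
   (267, "c"), (268, "C"), (269, "c"), (270, "D"), (271, "d"), (272, "D"),
   (273, "d"), (274, "E"), (275, "e"), (276, "E"), (277, "e"), (278, "E"),
   (279, "e"), (280, "E"), (281, "e"), (282, "E"), (283, "e"), (284, "G"),
   (285, "g"), (286, "G"), (287, "g"), (288, "G"), (289, "g"), (290, "G"),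
   (291, "g"), (292, "H"), (293, "h"), (294, "H"), (295, "h"), (296, "I"),
   (297, "i"), (298, "I"), (299, "i"), (300, "I"), (301, "i"), (302, "I"),
   (303, "i"), (304, "I"), (305, "i"), (306, "IJ"), (307, "ij"), (308, "J"),
   (309, "j"), (310, "K"), (311, "k"), (312, "K"), (313, "L"), (314, "l"),
   (315, "L"), (316, "l"), (317, "L"), (318, "l"), (319, "L"), (320, "l"),
   (321, "L"), (322, "l"), (323, "N"), (324, "n"), (325, "N"), (326, "n"),
   (327, "N"), (328, "n"), (329, "'n"), (330, "Ng"), (331, "ng"), (332, "O"),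
   (333, "o"), (334, "O"), (335, "o"), (336, "O"), (337, "o"), (338, "OE"),
   (339, "oe")]

def from_ord_alt (num : Int) (safe : Bool) : Option String :=
  if 32 < num ∧ num < 127 then some (pvChr num)
  else match pvTable.get? num with
  | some hit => some hit
  | none => none  -- safe: Python returns None; unsafe: Python raises Warning (outside Pre_)

-- ===== PRECONDITION & SPEC =====
-- Pre_ excludes exactly the inputs on which Python A raises Warning: safe=False and the
-- code point is neither printable ASCII nor in any table (the covered points are 192..339
-- except 222, 223, 254).
def Pre_from_ord (num : Int) (safe : Bool) : Prop :=
  safe = true ∨ (32 < num ∧ num < 127) ∨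
    (192 ≤ num ∧ num ≤ 339 ∧ num ≠ 222 ∧ num ≠ 223 ∧ num ≠ 254)
instance (num : Int) (safe : Bool) : Decidable (Pre_from_ord num safe) := by
  unfold Pre_from_ord; infer_instance

def pvWitness_from_ord : Int × Bool := (215, false)

def Spec_from_ord (num : Int) (safe : Bool) (out : Option String) : Prop := out = from_ord_alt num safe
instance (num : Int) (safe : Bool) (out : Option String) : Decidable (Spec_from_ord num safe out) := by unfold Spec_from_ord; infer_instance

-- ===== CLAIM (what is proved, stated in full; the proofs are below) =====
def Claim_equal_from_ord : Prop := ∀ (num : Int) (safe : Bool), Dom_from_ord num safe → Pre_from_ord num safe → Spec_from_ord num safe (from_ord num safe)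

-- ===== LEMMAS AND PROOFS =====

-- both ports agree on every code point of the table region 192..339 (checked pointwise)
set_option maxRecDepth 8192 in
set_option maxHeartbeats 2000000 in
theorem pv_agree_mid : ∀ k : Nat, k < 148 → ∀ safe : Bool,
    from_ord (192 + (k : Int)) safe = from_ord_alt (192 + (k : Int)) safe := by decide

-- every key of B's table lies in 192..339
set_option maxRecDepth 8192 in
set_option maxHeartbeats 1000000 in
theorem pv_table_keys_bound : ∀ k ∈ pvTable.keys, 192 ≤ k ∧ k ≤ 339 := by decide

theorem pv_singles_keys_bound : ∀ k ∈ pvSingles.keys, 192 ≤ k ∧ k ≤ 339 := by decide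

theorem pv_ranges_bound : ∀ t ∈ pvRanges, 192 ≤ t.1 ∧ t.2.1 ≤ 339 := by decide

theorem pv_doubles_bound : ∀ t ∈ pvDoubles, 192 ≤ t.1 ∧ t.2.1 ≤ 339 := by decide

theorem pv_miss_A (num : Int) (safe : Bool)
    (h : ¬ (32 < num ∧ num < 127)) (hlo : num < 192 ∨ 339 < num) :
    from_ord num safe = none := by
  unfold from_ord
  rw [if_neg h]
  have hs : pvSingles.get? num = none := by
    rw [PySem.Dict.get?_eq_none_iff_not_mem_keys]
    intro hm; have := pv_singles_keys_bound num hm; omega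
  have hr : pvRanges.findSome?
      (fun t => if t.1 ≤ num ∧ num ≤ t.2.1 then some t.2.2 else none) = none := by
    rw [List.findSome?_eq_none_iff]
    intro t ht; have := pv_ranges_bound t ht
    rw [if_neg]; omega
  have hd : pvDoubles.findSome? (fun t =>
      if t.1 ≤ num ∧ num ≤ t.2.1 then
        some (if PySem.Int.mod num 2 ≠ 0 then t.2.2.2 else t.2.2.1)
      else none) = none := by
    rw [List.findSome?_eq_none_iff]
    intro t ht; have := pv_doubles_bound t ht
    rw [if_neg]; omega
  rw [hs, hr, hd]
  simp

theorem pv_miss_B (num : Int) (safe : Bool)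
    (h : ¬ (32 < num ∧ num < 127)) (hlo : num < 192 ∨ 339 < num) :
    from_ord_alt num safe = none := by
  unfold from_ord_alt
  rw [if_neg h]
  have : pvTable.get? num = none := by
    rw [PySem.Dict.get?_eq_none_iff_not_mem_keys]
    intro hm
    have := pv_table_keys_bound num hm
    omega
  rw [this]

-- ===== VERDICT (by name: the statement is the Claim_ definition above) =====
theorem from_ord_spec : Claim_equal_from_ord := by
  intro num safe _ _
  unfold Spec_from_ord
  by_cases hp : 32 < num ∧ num < 127
  · unfold from_ord from_ord_alt; rw [if_pos hp, if_pos hp]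
  · by_cases hmid : 192 ≤ num ∧ num ≤ 339
    · obtain ⟨h1, h2⟩ := hmid
      have hk : num = 192 + ((num - 192).toNat : Int) := by omega
      rw [hk]
      exact pv_agree_mid (num - 192).toNat (by omega) safe
    · rw [pv_miss_A num safe hp (by omega), pv_miss_B num safe hp (by omega)]
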